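-- pv_equiv track=rewrite | github.com/khaledkamr/encryption-algorithms | running key vigenere cipher.py | running_key_vigenere_decrypt
-- ===== SOURCE A (Python) =====
-- def letter_to_number(letter):
--     return ord(letter.upper()) - ord('A')
--
-- def number_to_letter(number):
--     return chr((number % 26) + ord('A'))
--
-- def running_key_vigenere_decrypt(ciphertext, running_key):
--     plaintext = ""
--     # Extract only letters from the running key
--     key_stream = ''.join(char for char in running_key.upper() if char.isalpha())
--     ciphertext = ciphertext.upper()
--
--     # Check if key is long enough
--     if len(key_stream) < sum(c.isalpha() for c in ciphertext):
--         raise ValueError("Running key is too short for the ciphertext")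
--
--     key_index = 0
--     for i in range(len(ciphertext)):
--         if not ciphertext[i].isalpha():
--             plaintext += ciphertext[i]
--             continue
--
--         # Convert to numbers (0-25)
--         c = letter_to_number(ciphertext[i])
--         k = letter_to_number(key_stream[key_index])
--
--         # Decrypt: (c - k + 26) mod 26
--         p = (c - k + 26) % 26
--
--         plaintext += number_to_letter(p)
--         key_index += 1
--
--     return plaintext
-- ===== SOURCE B (Python) =====
-- def running_key_vigenere_decrypt(ciphertext, running_key):
--     ct = ciphertext.upper()
--     key_stream = ''.join(ch for ch in running_key.upper() if ch.isalpha())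
--     letters = [ch for ch in ct if ch.isalpha()]
--     if len(key_stream) < len(letters):
--         raise ValueError("Running key is too short for the ciphertext")
--     decrypted = [chr((ord(c) - ord(k)) % 26 + 65) for c, k in zip(letters, key_stream)]
--     it = iter(decrypted)
--     return ''.join(next(it) if ch.isalpha() else ch for ch in ct)
-- ===== Notes on version B (the rewrite author's own statement) =====
-- stated objective: alternative
-- what changed: Replaces the single key-index-threaded accumulator loop by two differently shaped passes: decrypt all ciphertext letters at once by zipping them with the alpha-only key stream, then reassemble the output by re-inserting non-letters verbatim while consuming the decrypted letters in order; Pre_ excludes only the inputs where both raise ValueError (key stream shorter than the letter count).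
import Mathlib
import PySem

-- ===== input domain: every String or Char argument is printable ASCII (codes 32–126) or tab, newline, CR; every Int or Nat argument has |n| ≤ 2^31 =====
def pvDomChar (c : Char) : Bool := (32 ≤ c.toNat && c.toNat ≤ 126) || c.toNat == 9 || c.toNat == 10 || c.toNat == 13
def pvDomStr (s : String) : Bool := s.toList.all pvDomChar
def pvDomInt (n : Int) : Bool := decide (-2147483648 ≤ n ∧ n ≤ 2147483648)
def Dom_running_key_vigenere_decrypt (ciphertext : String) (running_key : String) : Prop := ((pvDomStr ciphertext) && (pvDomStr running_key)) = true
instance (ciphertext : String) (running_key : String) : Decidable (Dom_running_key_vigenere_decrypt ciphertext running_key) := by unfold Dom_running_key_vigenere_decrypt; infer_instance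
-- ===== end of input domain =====

-- B replaces A's key-index-threaded loop by a zip-based decryption pass plus a reassembly pass (alternative decomposition, same results).

-- ===== PORT A =====
def pvLetterToNumber (c : Char) : Int :=
  ((PySem.Chars.upperChar c).toNat : Int) - 65

def pvNumberToLetter (n : Int) : Char :=
  -- divisor 26 > 0, so Lean's Int.emod (%) coincides with Python's % here
  Char.ofNat ((n % 26).toNat + 65)

def running_key_vigenere_decrypt (ciphertext : String) (running_key : String) : String :=
  let key_stream := (PySem.Str.upper running_key).toList.filter PySem.Chars.isalpha
  let ct := (PySem.Str.upper ciphertext).toList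
  if key_stream.length < ct.countP (fun c => PySem.Chars.isalpha c) then
    ""  -- Python raises ValueError here; excluded by Pre_
  else
    let r := (PySem.List.pyRange 0 (ct.length : Int) 1).foldl
      (fun (st : List Char × Nat) i =>
        let c := PySem.List.pyGetD ct i ' '
        if !(PySem.Chars.isalpha c) then (st.1 ++ [c], st.2)
        else
          let cn := pvLetterToNumber c
          let kn := pvLetterToNumber (PySem.List.pyGetD key_stream (st.2 : Int) 'A')
          let p := (cn - kn + 26) % 26  -- divisor 26 > 0: emod = Python %
          (st.1 ++ [pvNumberToLetter p], st.2 + 1))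
      ([], 0)
    String.ofList r.1

-- ===== PORT B =====
def pvDecChar (c k : Char) : Char :=
  -- chr((ord(c) - ord(k)) % 26 + 65); divisor 26 > 0: emod = Python %
  Char.ofNat ((((c.toNat : Int) - (k.toNat : Int)) % 26).toNat + 65)

-- the final join: non-alpha chars verbatim, alpha positions consume from ds ("next(it)")
def pvReassemble : List Char → List Char → List Char
  | [], _ => []
  | c :: cs, ds =>
    if PySem.Chars.isalpha c then
      match ds with
      | d :: ds' => d :: pvReassemble cs ds'
      | [] => pvReassemble cs []  -- unreachable under the length check
    else c :: pvReassemble cs ds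

def running_key_vigenere_decrypt_alt (ciphertext : String) (running_key : String) : String :=
  let ct := (PySem.Str.upper ciphertext).toList
  let key_stream := (PySem.Str.upper running_key).toList.filter PySem.Chars.isalpha
  let letters := ct.filter PySem.Chars.isalpha
  if key_stream.length < letters.length then
    ""  -- Python raises ValueError here; excluded by Pre_
  else
    String.ofList (pvReassemble ct ((letters.zip key_stream).map (fun p => pvDecChar p.1 p.2)))

-- ===== PRECONDITION & SPEC =====
-- Pre_ excludes exactly the inputs on which A (and B) raise ValueError: fewer alphabetic
-- characters in the running key than in the ciphertext.
def Pre_running_key_vigenere_decrypt (ciphertext : String) (running_key : String) : Prop :=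
  ciphertext.toList.countP (fun c => PySem.Chars.isalpha c) ≤
    running_key.toList.countP (fun c => PySem.Chars.isalpha c)

instance (ciphertext : String) (running_key : String) : Decidable (Pre_running_key_vigenere_decrypt ciphertext running_key) := by
  unfold Pre_running_key_vigenere_decrypt; infer_instance

def pvWitness_running_key_vigenere_decrypt : String × String := ("Attack at dawn!", "The quick brown fox")

def Spec_running_key_vigenere_decrypt (ciphertext : String) (running_key : String) (out : String) : Prop := out = running_key_vigenere_decrypt_alt ciphertext running_key
instance (ciphertext : String) (running_key : String) (out : String) : Decidable (Spec_running_key_vigenere_decrypt ciphertext running_key out) := by unfold Spec_running_key_vigenere_decrypt; infer_instance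

-- ===== CLAIM (what is proved, stated in full; the proofs are below) =====
def Claim_equal_running_key_vigenere_decrypt : Prop := ∀ (ciphertext : String) (running_key : String), Dom_running_key_vigenere_decrypt ciphertext running_key → Pre_running_key_vigenere_decrypt ciphertext running_key → Spec_running_key_vigenere_decrypt ciphertext running_key (running_key_vigenere_decrypt ciphertext running_key)

-- ===== LEMMAS AND PROOFS =====

theorem pv_islower_iff (c : Char) : PySem.Chars.islower c = true ↔ 97 ≤ c.toNat ∧ c.toNat ≤ 122 := by
  rw [PySem.Chars.islower]
  simp only [Bool.and_eq_true, decide_eq_true_eq, Char.le_def, UInt32.le_iff_toNat_le, Char.toNat_val]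
  constructor <;> (intro h; constructor) <;> first | exact h.1 | exact h.2

theorem pv_isupper_iff (c : Char) : PySem.Chars.isupper c = true ↔ 65 ≤ c.toNat ∧ c.toNat ≤ 90 := by
  rw [PySem.Chars.isupper]
  simp only [Bool.and_eq_true, decide_eq_true_eq, Char.le_def, UInt32.le_iff_toNat_le, Char.toNat_val]
  constructor <;> (intro h; constructor) <;> first | exact h.1 | exact h.2

theorem pv_toNat_upper (c : Char) (h : PySem.Chars.islower c = true) :
    (PySem.Chars.upperChar c).toNat = c.toNat - 32 := by
  rw [PySem.Chars.upperChar, if_pos h]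
  rw [pv_islower_iff] at h
  rw [Char.toNat_ofNat, if_pos]
  exact Or.inl (by omega)

theorem pv_isalpha_upperChar (c : Char) :
    PySem.Chars.isalpha (PySem.Chars.upperChar c) = PySem.Chars.isalpha c := by
  by_cases h : PySem.Chars.islower c = true
  · have ht := pv_toNat_upper c h
    have h' := (pv_islower_iff c).mp h
    have hu : PySem.Chars.isupper (PySem.Chars.upperChar c) = true :=
      (pv_isupper_iff _).mpr ⟨by omega, by omega⟩
    simp [PySem.Chars.isalpha, hu, h]
  · rw [PySem.Chars.upperChar, if_neg h]

theorem pv_upperChar_idem (c : Char) :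
    PySem.Chars.upperChar (PySem.Chars.upperChar c) = PySem.Chars.upperChar c := by
  by_cases h : PySem.Chars.islower c = true
  · have ht := pv_toNat_upper c h
    have h' := (pv_islower_iff c).mp h
    have : ¬ PySem.Chars.islower (PySem.Chars.upperChar c) = true := by
      rw [pv_islower_iff]; omega
    rw [PySem.Chars.upperChar, if_neg this]
  · have he : PySem.Chars.upperChar c = c := by rw [PySem.Chars.upperChar, if_neg h]
    rw [he, he]

theorem pv_dec_eq (c k : Char)
    (hc : PySem.Chars.upperChar c = c) (hk : PySem.Chars.upperChar k = k) :
    pvNumberToLetter ((pvLetterToNumber c - pvLetterToNumber k + 26) % 26) = pvDecChar c k := by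
  rw [pvNumberToLetter, pvDecChar, pvLetterToNumber, pvLetterToNumber, hc, hk]
  congr 1
  omega

theorem pv_loop_eq (ks : List Char) (hk : ∀ x ∈ ks, PySem.Chars.upperChar x = x) :
    ∀ (ct : List Char) (ki : Nat) (pt : List Char),
    (∀ x ∈ ct, PySem.Chars.upperChar x = x) →
    (ct.filter PySem.Chars.isalpha).length + ki ≤ ks.length →
    (ct.foldl
      (fun (st : List Char × Nat) c =>
        if !(PySem.Chars.isalpha c) then (st.1 ++ [c], st.2)
        else
          (st.1 ++ [pvNumberToLetter
            ((pvLetterToNumber c - pvLetterToNumber (PySem.List.pyGetD ks (st.2 : Int) 'A') + 26) % 26)],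
           st.2 + 1))
      (pt, ki)).1
    = pt ++ pvReassemble ct
        (((ct.filter PySem.Chars.isalpha).zip (ks.drop ki)).map (fun p => pvDecChar p.1 p.2)) := by
  intro ct
  induction ct with
  | nil => intro ki pt _ _; simp [pvReassemble]
  | cons c cs ih =>
    intro ki pt hct hlen
    by_cases ha : PySem.Chars.isalpha c = true
    · have hki : ki < ks.length := by
        have := hlen
        simp only [List.filter_cons, ha, ite_true, List.length_cons] at this
        omega
      have hget : PySem.List.pyGetD ks (ki : Int) 'A' = ks[ki] := by
        rw [PySem.List.pyGetD_natCast, List.getD_eq_getElem?_getD, List.getElem?_eq_getElem hki]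
        rfl
      have hdrop : ks.drop ki = ks[ki] :: ks.drop (ki + 1) := List.drop_eq_getElem_cons hki
      have hdec : pvNumberToLetter
          ((pvLetterToNumber c - pvLetterToNumber ks[ki] + 26) % 26) = pvDecChar c ks[ki] :=
        pv_dec_eq c ks[ki] (hct c (List.mem_cons_self)) (hk ks[ki] (List.getElem_mem hki))
      rw [List.foldl_cons]
      simp only [ha, Bool.not_true, Bool.false_eq_true, if_false]
      rw [hget, hdec]
      rw [ih (ki + 1) (pt ++ [pvDecChar c ks[ki]])
          (fun x hx => hct x (List.mem_cons_of_mem _ hx))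
          (by simp only [List.filter_cons, ha, ite_true, List.length_cons] at hlen ⊢; omega)]
      rw [List.filter_cons, if_pos ha, hdrop, List.zip_cons_cons, List.map_cons]
      simp only [pvReassemble, ha, if_true]
      simp
    · rw [List.foldl_cons]
      simp only [ha, Bool.not_false, if_true]
      rw [ih ki (pt ++ [c]) (fun x hx => hct x (List.mem_cons_of_mem _ hx))
          (by simp only [List.filter_cons, ha] at hlen ⊢; simpa using hlen)]
      rw [List.filter_cons, if_neg (by simp [ha])]
      simp [pvReassemble, ha]

-- ===== VERDICT (by name: the statement is the Claim_ definition above) =====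
theorem running_key_vigenere_decrypt_spec : Claim_equal_running_key_vigenere_decrypt := by
  intro ciphertext running_key _ hpre
  unfold Spec_running_key_vigenere_decrypt
  unfold Pre_running_key_vigenere_decrypt at hpre
  rw [running_key_vigenere_decrypt, running_key_vigenere_decrypt_alt]
  simp only [PySem.Str.toList_upper, PySem.Chars.upper]
  set u := ciphertext.toList.map PySem.Chars.upperChar with hu
  set ks := (running_key.toList.map PySem.Chars.upperChar).filter PySem.Chars.isalpha with hks
  have hcount : u.countP (fun c => PySem.Chars.isalpha c) = (u.filter PySem.Chars.isalpha).length := by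
    rw [List.countP_eq_length_filter]
  have hklen : ks.length = running_key.toList.countP (fun c => PySem.Chars.isalpha c) := by
    rw [hks, ← List.countP_eq_length_filter, List.countP_map]
    congr 1; funext x; exact pv_isalpha_upperChar x
  have hulen : (u.filter PySem.Chars.isalpha).length
      = ciphertext.toList.countP (fun c => PySem.Chars.isalpha c) := by
    rw [hu, ← List.countP_eq_length_filter, List.countP_map]
    congr 1; funext x; exact pv_isalpha_upperChar x
  have hle : (u.filter PySem.Chars.isalpha).length ≤ ks.length := by omega
  rw [if_neg (by omega), if_neg (by omega)]
  have hloop := pv_loop_eq ks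
    (fun x hx => by
      obtain ⟨y, _, rfl⟩ := List.mem_map.mp (List.mem_of_mem_filter hx)
      exact pv_upperChar_idem y)
    u 0 []
    (by intro x hx; obtain ⟨y, _, rfl⟩ := List.mem_map.mp hx; exact pv_upperChar_idem y)
    (by simpa using hle)
  rw [PySem.List.foldl_pyRange_zero_pyGetD' u ' '
    (fun (st : List Char × Nat) c =>
      if (!PySem.Chars.isalpha c) = true then (st.1 ++ [c], st.2)
      else
        (st.1 ++ [pvNumberToLetter
          ((pvLetterToNumber c - pvLetterToNumber (PySem.List.pyGetD ks (st.2 : Int) 'A') + 26) % 26)],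
         st.2 + 1))
    ([], 0)]
  rw [List.drop_zero] at hloop
  rw [hloop]
  simp
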